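-- pv_equiv track=rewrite | github.com/ericmerle3789/Collatz-Junction-Theorem | scripts/research/r48_sdl_investigator.py | compute_slice_distribution
-- ===== SOURCE A (Python) =====
-- from math import comb, gcd, ceil, log2, sqrt, log, pi
-- from itertools import combinations_with_replacement
--
-- def compute_S(k):
--     """Minimal S such that 2^S > 3^k. Exact via integer comparison."""
--     S = ceil(k * log2(3))
--     three_k = 3 ** k
--     while (1 << S) <= three_k:
--         S += 1
--     while S > 0 and (1 << (S - 1)) > three_k:
--         S -= 1
--     return S
--
-- def compute_g(k, mod):
--     """g = 2 * 3^{-1} mod m."""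
--     if gcd(3, mod) != 1:
--         return None
--     return (2 * pow(3, -1, mod)) % mod
--
-- def compute_slice_distribution(k, p, b0, g=None):
--     """Compute the residue distribution of slice b0.
--
--     For slice b0, we count over (B_1,...,B_{k-1}) with B_1 >= b0, B_{k-1} = max_B,
--     the residues Sum_{j=1}^{k-1} g^j * 2^{B_j} mod p.
--
--     Returns: (count_array, n_vectors)
--     """
--     S_val = compute_S(k)
--     max_B = S_val - k
--     if g is None:
--         g = compute_g(k, p)
--
--     count = [0] * p
--     n_vecs = 0
--
--     if k == 2:
--         # Only B_1 = max_B (fixed)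
--         res = (g * pow(2, max_B, p)) % p
--         count[res] += 1
--         n_vecs = 1
--     else:
--         for combo in combinations_with_replacement(range(b0, max_B + 1), k - 2):
--             if len(combo) == 0 or combo[-1] <= max_B:
--                 B_rest = combo + (max_B,)
--                 res = 0
--                 gj = g  # g^1
--                 for bj in B_rest:
--                     res = (res + gj * pow(2, bj, p)) % p
--                     gj = (gj * g) % p
--                 count[res] += 1
--                 n_vecs += 1
--
--     return count, n_vecs
-- ===== SOURCE B (Python) =====
-- def compute_slice_distribution(k, p, b0, g=None):
--     """Compute the residue distribution of slice b0.
--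
--     Same result as the original, via a single depth-first recursion that
--     accumulates the partial residue (and the running power of g) along the
--     way, instead of materialising every tuple with itertools and re-scanning
--     it with one modular pow per coordinate.
--     """
--     max_B = (3 ** k).bit_length() - k   # minimal S with 2**S > 3**k, minus k
--
--     if k == 2:
--         if g is None:
--             g = (2 * pow(3, -1, p)) % p
--         count = [0] * p
--         count[(g * pow(2, max_B, p)) % p] = 1
--         return count, 1
--
--     count = [0] * p
--     if b0 > max_B:            # empty slice: nothing to enumerate
--         return count, 0
--     if g is None:
--         g = (2 * pow(3, -1, p)) % p
--
--     n_vecs = 0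
--
--     def go(lo, j, res, gj):
--         # j free positions left, each >= lo; partial residue res, next weight gj;
--         # the fixed last coordinate max_B is folded in at the leaf.
--         nonlocal n_vecs
--         if j == 0:
--             count[(res + gj * pow(2, max_B, p)) % p] += 1
--             n_vecs += 1
--         else:
--             for v in range(lo, max_B + 1):
--                 go(v, j - 1, (res + gj * pow(2, v, p)) % p, (gj * g) % p)
--
--     go(b0, k - 2, 0, g)
--     return count, n_vecs
-- ===== Notes on version B (the rewrite author's own statement) =====
-- stated objective: alternative
-- what changed: Replaces itertools.combinations_with_replacement plus a per-tuple residue rescan (one modular pow per coordinate of every tuple) by a single depth-first recursion that accumulates the partial residue and the running power of g along the enumeration tree (one modular pow per tree node); max_B comes from (3**k).bit_length() instead of a float-seeded loop, and an empty slice returns before any modular work.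
import Mathlib
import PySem

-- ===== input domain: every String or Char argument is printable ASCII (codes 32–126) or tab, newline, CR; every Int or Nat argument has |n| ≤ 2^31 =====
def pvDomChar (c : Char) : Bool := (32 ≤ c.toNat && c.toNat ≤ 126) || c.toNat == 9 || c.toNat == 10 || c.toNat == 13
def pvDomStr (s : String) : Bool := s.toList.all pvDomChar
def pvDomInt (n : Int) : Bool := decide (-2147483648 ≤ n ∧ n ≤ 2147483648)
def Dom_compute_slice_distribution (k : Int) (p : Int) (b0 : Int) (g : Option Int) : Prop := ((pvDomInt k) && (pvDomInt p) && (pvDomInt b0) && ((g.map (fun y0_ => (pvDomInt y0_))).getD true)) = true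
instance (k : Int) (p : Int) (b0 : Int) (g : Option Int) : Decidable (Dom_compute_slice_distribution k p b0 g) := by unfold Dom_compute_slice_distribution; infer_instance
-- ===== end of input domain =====

-- B replaces A's itertools enumeration + per-tuple residue rescan by one depth-first
-- recursion that accumulates the residue along the tree (objective: alternative —
-- one modular pow per tree node instead of one per coordinate of every tuple).

-- ===== PORT A =====

-- Python's 3-argument pow(b, e, m) for m ≥ 1 (all uses here have m ≥ 1 under Pre_).
-- For e < 0 Python inverts b mod m by extended gcd (raising ValueError when
-- gcd(b, m) ≠ 1 — those inputs are outside Pre_; the port returns 0 there).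
def pyPowMod (b e m : Int) : Int :=
  if e < 0 then
    let a := PySem.Int.mod b m
    if Nat.gcd a.toNat m.toNat = 1 then
      PySem.Int.powMod (PySem.Int.mod (Nat.gcdA a.toNat m.toNat) m) (-e).toNat m
    else 0
  else PySem.Int.powMod b e.toNat m

-- count[i] += 1 (i in range under Pre_, as in the Python)
def bump (xs : List Int) (i : Int) : List Int :=
  xs.set i.toNat (xs.getD i.toNat 0 + 1)

-- compute_S: 'while (1 << S) <= three_k: S += 1'
def loopUp (t : Nat) (s : Nat) : Nat :=
  if 2 ^ s ≤ t then loopUp t (s + 1) else s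
  termination_by t + 1 - 2 ^ s
  decreasing_by
    have h1 : 2 ^ s < 2 ^ (s + 1) := Nat.pow_lt_pow_right (by omega) (by omega)
    omega

-- compute_S: 'while S > 0 and (1 << (S - 1)) > three_k: S -= 1'
def loopDown (t : Nat) (s : Nat) : Nat :=
  if 0 < s ∧ t < 2 ^ (s - 1) then loopDown t (s - 1) else s
  termination_by s
  decreasing_by omega

-- Python seeds S with the float expression ceil(k*log2(3)); the two normalisation
-- loops make the result independent of the seed (proved below: it is the minimal S
-- with 2^S > 3^k), so the port seeds with a fixed-point ceil(k * log2(3)) instead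
-- (1742684699132 = ceil(2^40 * log2 3); like Python's float seed it is within 1 of
-- the target, so the loops run O(1) iterations).
def compute_S_A (k : Int) : Int :=
  let t : Nat := 3 ^ k.toNat
  let seed : Nat := (k.toNat * 1742684699132 + (2 ^ 40 - 1)) / 2 ^ 40
  (loopDown t (loopUp t seed) : Int)

def compute_g_A (k mod : Int) : Option Int :=
  if Int.gcd 3 mod ≠ 1 then none
  else some (PySem.Int.mod (2 * pyPowMod 3 (-1) mod) mod)

-- itertools.combinations_with_replacement(range(lo, hi+1), r), in lexicographic order
def cwr (lo hi : Int) (r : Nat) : List (List Int) :=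
  match r with
  | 0 => [[]]
  | r + 1 => (PySem.List.pyRange lo (hi + 1)).flatMap
      (fun v => (cwr v hi r).map (fun c => v :: c))

def compute_slice_distribution (k : Int) (p : Int) (b0 : Int) (g : Option Int) : List Int × Int :=
  let S_val := compute_S_A k
  let maxB := S_val - k
  -- 'if g is None: g = compute_g(k, p)'; a None result is only ever used where
  -- Pre_ excludes it (Python raises TypeError there), the port defaults it to 0
  let gv : Int := match g with
    | some v => v
    | none => (compute_g_A k p).getD 0
  if k = 2 then
    (bump (List.replicate p.toNat 0) (PySem.Int.mod (gv * pyPowMod 2 maxB p) p), 1)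
  else
    -- Python raises ValueError for k < 2 (negative r); outside Pre_, port uses (k-2).toNat
    (cwr b0 maxB (k - 2).toNat).foldl
      (fun st combo =>
        if combo.length = 0 ∨ PySem.List.pyGetD combo (-1) 0 ≤ maxB then
          let B_rest := combo ++ [maxB]
          let res := (B_rest.foldl
            (fun rg bj => (PySem.Int.mod (rg.1 + rg.2 * pyPowMod 2 bj p) p,
                           PySem.Int.mod (rg.2 * gv) p)) (0, gv)).1
          (bump st.1 res, st.2 + 1)
        else st)
      (List.replicate p.toNat 0, 0)

-- ===== PORT B =====

-- depth-first recursion of Source B: j free positions ≥ lo, partial residue res, next weight gj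
def goB (p g maxB : Int) (lo : Int) (j : Nat) (res gj : Int) (st : List Int × Int) : List Int × Int :=
  match j with
  | 0 => (bump st.1 (PySem.Int.mod (res + gj * pyPowMod 2 maxB p) p), st.2 + 1)
  | j + 1 => (PySem.List.pyRange lo (maxB + 1)).foldl
      (fun st v => goB p g maxB v j (PySem.Int.mod (res + gj * pyPowMod 2 v p) p)
                     (PySem.Int.mod (gj * g) p) st) st

def compute_slice_distribution_alt (k : Int) (p : Int) (b0 : Int) (g : Option Int) : List Int × Int :=
  -- (3 ** k).bit_length() - k  (k ≥ 2 under Pre_; port reads k.toNat)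
  let maxB : Int := (PySem.Int.bitLength ((3 : Int) ^ k.toNat) : Int) - k
  if k = 2 then
    let gv : Int := match g with
      | some v => v
      | none => PySem.Int.mod (2 * pyPowMod 3 (-1) p) p
    ((List.replicate p.toNat 0).set (PySem.Int.mod (gv * pyPowMod 2 maxB p) p).toNat 1, 1)
  else
    if maxB < b0 then (List.replicate p.toNat 0, 0)
    else
      let gv : Int := match g with
        | some v => v
        | none => PySem.Int.mod (2 * pyPowMod 3 (-1) p) p
      goB p gv maxB b0 (k - 2).toNat 0 gv (List.replicate p.toNat 0, 0)

-- ===== PRECONDITION & SPEC =====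

-- Decides 'the slice is empty' (b0 > max_B, i.e. 3^k < 2^(k+b0-1)) without ever
-- computing 3^k except inside a provably thin band: the two linear certificates
-- come from 3^15601 < 2^24727 (proved below) and 2^50508 < 3^31867 (convergents
-- of log2 3; only the first is needed for soundness of the claim).
def pvEmptySlice (k b0 : Int) : Bool :=
  decide (2 ≤ b0) &&
  (let kn := k.toNat
   let m := (k + b0 - 1).toNat
   if 24727 * kn ≤ 15601 * m then true
   else if 31867 * m ≤ 50508 * kn then false
   else decide ((3 : Nat) ^ kn < 2 ^ m))

-- Pre_ holds exactly where the Python A returns: it excludes k < 2 (ValueError in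
-- combinations_with_replacement) and, whenever at least one residue is actually
-- computed (k = 2, or k ≥ 3 with a nonempty enumeration), p < 1 (IndexError /
-- ValueError on the histogram or modulus), a defaulted g with 3 | p (compute_g is
-- None, TypeError), and negative exponents with an even p (ValueError in pow).
-- When k ≥ 3 and the enumeration is empty (b0 > max_B, decided by pvEmptySlice)
-- A returns the untouched zero histogram for ANY p and g, and those inputs are
-- all inside Pre_ via the second disjunct.
def Pre_compute_slice_distribution (k : Int) (p : Int) (b0 : Int) (g : Option Int) : Prop :=
  2 ≤ k ∧
  ((1 ≤ p ∧ (g = none → ¬ (3 : Int) ∣ p) ∧ (k = 2 ∨ 0 ≤ b0 ∨ ¬ (2 : Int) ∣ p)) ∨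
   (¬ k = 2 ∧ pvEmptySlice k b0 = true))
instance (k : Int) (p : Int) (b0 : Int) (g : Option Int) : Decidable (Pre_compute_slice_distribution k p b0 g) := by unfold Pre_compute_slice_distribution; infer_instance

def pvWitness_compute_slice_distribution : Int × Int × Int × Option Int := (3, 5, 0, none)

def Spec_compute_slice_distribution (k : Int) (p : Int) (b0 : Int) (g : Option Int) (out : List Int × Int) : Prop := out = compute_slice_distribution_alt k p b0 g
instance (k : Int) (p : Int) (b0 : Int) (g : Option Int) (out : List Int × Int) : Decidable (Spec_compute_slice_distribution k p b0 g out) := by unfold Spec_compute_slice_distribution; infer_instance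

-- ===== CLAIM (what is proved, stated in full; the proofs are below) =====
def Claim_equal_compute_slice_distribution : Prop := ∀ (k : Int) (p : Int) (b0 : Int) (g : Option Int), Dom_compute_slice_distribution k p b0 g → Pre_compute_slice_distribution k p b0 g → Spec_compute_slice_distribution k p b0 g (compute_slice_distribution k p b0 g)

-- ===== LEMMAS AND PROOFS =====

theorem loopUp_gt (t s : Nat) : t < 2 ^ loopUp t s := by
  fun_induction loopUp t s with
  | case1 s h ih => exact ih
  | case2 s h => omega

theorem loopDown_eq_size (t s : Nat) (ht : 1 ≤ t) (h : t < 2 ^ s) :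
    loopDown t s = Nat.size t := by
  fun_induction loopDown t s with
  | case1 s h' ih => exact ih h'.2
  | case2 s h' =>
    rcases Nat.eq_zero_or_pos s with hs | hs
    · subst hs; simp at h; omega
    · have h2 : 2 ^ (s - 1) ≤ t := by
        by_contra hc; exact h' ⟨hs, by omega⟩
      have hle : Nat.size t ≤ s := Nat.size_le.mpr h
      have hlt : s - 1 < Nat.size t := Nat.lt_size.mpr h2
      omega

theorem bitLength_eq_size (t : Nat) (ht : 1 ≤ t) :
    PySem.Int.bitLength (t : Int) = Nat.size t := by
  have h1 := PySem.Int.lt_two_pow_bitLength (t : Int)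
  have h2 := PySem.Int.two_pow_bitLength_le (t : Int)
    (by exact_mod_cast Nat.one_le_iff_ne_zero.mp ht)
  simp only [Int.natAbs_natCast] at h1 h2
  have hle : Nat.size t ≤ PySem.Int.bitLength (t : Int) := Nat.size_le.mpr h1
  have hpos : 0 < PySem.Int.bitLength (t : Int) := by
    by_contra hc
    have h0 : PySem.Int.bitLength (t : Int) = 0 := by omega
    rw [h0] at h1; omega
  have hlt : PySem.Int.bitLength (t : Int) - 1 < Nat.size t := Nat.lt_size.mpr h2
  omega

theorem maxB_eq (k : Int) :
    compute_S_A k = (PySem.Int.bitLength ((3 : Int) ^ k.toNat) : Int) := by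
  have ht : 1 ≤ 3 ^ k.toNat := Nat.one_le_pow _ _ (by omega)
  have h3 : ((3 : Int) ^ k.toNat) = ((3 ^ k.toNat : Nat) : Int) := by push_cast; ring
  rw [compute_S_A, h3, bitLength_eq_size _ ht,
    loopDown_eq_size _ _ ht (loopUp_gt _ _)]

theorem cwr_mem_le (hi : Int) : ∀ (j : Nat) (lo : Int) (c : List Int),
    c ∈ cwr lo hi j → ∀ x ∈ c, x ≤ hi := by
  intro j
  induction j with
  | zero => intro lo c hc x hx; simp [cwr] at hc; subst hc; simp at hx
  | succ j ih =>
    intro lo c hc x hx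
    simp only [cwr, List.mem_flatMap, List.mem_map] at hc
    obtain ⟨v, hv, c', hc', rfl⟩ := hc
    rcases List.mem_cons.mp hx with rfl | hx'
    · have := PySem.List.mem_pyRange_one.mp hv; omega
    · exact ih v c' hc' x hx'

theorem goB_spec (p g maxB : Int) : ∀ (j : Nat) (lo res gj : Int) (st : List Int × Int),
    goB p g maxB lo j res gj st =
    (cwr lo maxB j).foldl
      (fun st combo =>
        (bump st.1 ((combo ++ [maxB]).foldl
          (fun rg bj => (PySem.Int.mod (rg.1 + rg.2 * pyPowMod 2 bj p) p,
                         PySem.Int.mod (rg.2 * g) p)) (res, gj)).1, st.2 + 1)) st := by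
  intro j
  induction j with
  | zero => intro lo res gj st; simp [goB, cwr]
  | succ j ih =>
    intro lo res gj st
    simp only [goB, cwr, List.foldl_flatMap]
    congr 1
    funext st v
    rw [List.foldl_map, ih]
    congr 1

-- the guard 'len(combo)==0 or combo[-1] <= max_B' holds for every generated combo
theorem cwr_guard_true (hi : Int) (j : Nat) (lo : Int) (c : List Int) (hc : c ∈ cwr lo hi j) :
    (c.length = 0 ∨ PySem.List.pyGetD c (-1) 0 ≤ hi) := by
  rcases List.eq_nil_or_concat c with rfl | ⟨c', x, rfl⟩
  · left; rfl
  · right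
    simp only [List.concat_eq_append] at hc ⊢
    have hne : c' ++ [x] ≠ [] := by simp
    rw [PySem.List.pyGetD_neg_one _ _ hne]
    exact cwr_mem_le hi j lo _ hc _ (List.getLast_mem hne)

theorem gcd_three_eq_one (p : Int) (hp : ¬ (3 : Int) ∣ p) : Int.gcd 3 p = 1 := by
  have hd : (Int.gcd 3 p : Nat) ∣ 3 := by
    have h := Int.gcd_dvd_left (3 : Int) p
    exact_mod_cast Int.ofNat_dvd.mp (by exact_mod_cast h)
  rcases (Nat.prime_three.eq_one_or_self_of_dvd _ hd) with h | h
  · exact h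
  · exfalso
    apply hp
    have h2 := Int.gcd_dvd_right (3 : Int) p
    rw [h] at h2; exact_mod_cast h2

theorem bump_replicate (n : Nat) (i : Int) (h0 : 0 ≤ i) (hn : i < (n : Int)) :
    bump (List.replicate n (0 : Int)) i = (List.replicate n (0 : Int)).set i.toNat 1 := by
  unfold bump
  rw [List.getD_replicate 0 (by omega)]
  norm_num

-- the two ports compute the same g value in the None case (needs 3 invertible mod p)
theorem compute_g_A_eq (k p : Int) (hp3 : ¬ (3 : Int) ∣ p) :
    compute_g_A k p = some (PySem.Int.mod (2 * pyPowMod 3 (-1) p) p) := by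
  rw [compute_g_A, if_neg (by simp [gcd_three_eq_one p hp3])]

-- for k ≥ 3 with an empty slice both ports return the untouched zero histogram
theorem A_empty (k p b0 : Int) (g : Option Int) (hk3 : 3 ≤ k)
    (hemp : (PySem.Int.bitLength ((3 : Int) ^ k.toNat) : Int) - k < b0) :
    compute_slice_distribution k p b0 g = (List.replicate p.toNat 0, 0) := by
  simp only [compute_slice_distribution, if_neg (show ¬ k = 2 by omega)]
  rw [maxB_eq]
  obtain ⟨r, hr⟩ : ∃ r : Nat, (k - 2).toNat = r + 1 := ⟨(k - 3).toNat, by omega⟩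
  rw [hr]
  simp only [cwr]
  rw [PySem.List.pyRange_one_eq_nil (by omega)]
  simp

theorem B_empty (k p b0 : Int) (g : Option Int) (hk3 : 3 ≤ k)
    (hemp : (PySem.Int.bitLength ((3 : Int) ^ k.toNat) : Int) - k < b0) :
    compute_slice_distribution_alt k p b0 g = (List.replicate p.toNat 0, 0) := by
  simp only [compute_slice_distribution_alt, if_neg (show ¬ k = 2 by omega), if_pos hemp]

-- with the g argument supplied, A's and B's bodies coincide literally; the
-- equivalence is proved for this shape and the None case is reduced to it
theorem core (k p b0 gv : Int) (hk : 2 ≤ k)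
    (hp1 : (k = 2 ∨ b0 ≤ (PySem.Int.bitLength ((3 : Int) ^ k.toNat) : Int) - k) → 1 ≤ p) :
    compute_slice_distribution k p b0 (some gv) = compute_slice_distribution_alt k p b0 (some gv) := by
  by_cases hk2 : k = 2
  · have hp := hp1 (Or.inl hk2)
    simp only [compute_slice_distribution, compute_slice_distribution_alt, if_pos hk2]
    rw [maxB_eq]
    have hres0 := PySem.Int.mod_nonneg
      (gv * pyPowMod 2 ((PySem.Int.bitLength ((3 : Int) ^ k.toNat) : Int) - k) p)
      (show (0:Int) < p by omega)
    have hresl := PySem.Int.mod_lt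
      (gv * pyPowMod 2 ((PySem.Int.bitLength ((3 : Int) ^ k.toNat) : Int) - k) p)
      (show (0:Int) < p by omega)
    rw [bump_replicate p.toNat _ hres0 (by omega)]
  · have hk3 : 3 ≤ k := by omega
    by_cases hemp : (PySem.Int.bitLength ((3 : Int) ^ k.toNat) : Int) - k < b0
    · rw [A_empty k p b0 _ hk3 hemp, B_empty k p b0 _ hk3 hemp]
    · simp only [compute_slice_distribution, compute_slice_distribution_alt,
        if_neg hk2, if_neg hemp]
      rw [maxB_eq, goB_spec]
      apply PySem.List.foldl_congr_mem
      intro acc c hc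
      rw [if_pos (cwr_guard_true _ _ _ _ hc)]

-- the two convergent constants behind pvEmptySlice's linear certificates
theorem conv_up : (3 : Nat) ^ 15601 < 2 ^ 24727 := by
  have hA : (3 : Nat) ^ 15601 = ((3 : Nat) ^ 124) ^ 125 * 3 ^ 101 := by
    rw [← pow_mul, ← pow_add]
  have hB : (2 : Nat) ^ 24727 = ((2 : Nat) ^ 156) ^ 158 * 2 ^ 79 := by
    rw [← pow_mul, ← pow_add]
  rw [hA, hB]; decide

-- a true pvEmptySlice really certifies 3^k < 2^(k+b0-1)
theorem emptySlice_sound (k b0 : Int) (hk : 1 ≤ k) (h : pvEmptySlice k b0 = true) :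
    2 ≤ b0 ∧ (3 : Nat) ^ k.toNat < 2 ^ (k + b0 - 1).toNat := by
  unfold pvEmptySlice at h
  rw [Bool.and_eq_true, decide_eq_true_iff] at h
  obtain ⟨hb0, h⟩ := h
  refine ⟨hb0, ?_⟩
  simp only at h
  set kn := k.toNat with hkn
  set m := (k + b0 - 1).toNat with hm
  have hkn1 : 1 ≤ kn := by omega
  split_ifs at h with h1 h2
  · -- 24727 * kn ≤ 15601 * m
    have hs : ((3 : Nat) ^ kn) ^ 15601 < ((2 : Nat) ^ m) ^ 15601 := by
      calc ((3 : Nat) ^ kn) ^ 15601 = ((3 : Nat) ^ 15601) ^ kn := by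
            rw [← pow_mul, mul_comm, pow_mul]
        _ < ((2 : Nat) ^ 24727) ^ kn := Nat.pow_lt_pow_left conv_up (by omega)
        _ = 2 ^ (24727 * kn) := by rw [← pow_mul]
        _ ≤ 2 ^ (15601 * m) := Nat.pow_le_pow_right (by omega) h1
        _ = ((2 : Nat) ^ m) ^ 15601 := by rw [← pow_mul, mul_comm, pow_mul]
    exact (Nat.pow_lt_pow_iff_left (by omega)).mp hs
  · exact of_decide_eq_true h

-- ===== VERDICT (by name: the statement is the Claim_ definition above) =====
theorem compute_slice_distribution_spec : Claim_equal_compute_slice_distribution := by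
  intro k p b0 g _ hpre
  unfold Spec_compute_slice_distribution
  obtain ⟨hk, hrest⟩ := hpre
  rcases hrest with ⟨hp1, hp3, -⟩ | ⟨hk2, hch⟩
  · cases g with
    | some v => exact core k p b0 v hk (fun _ => hp1)
    | none =>
      have hg := compute_g_A_eq k p (hp3 rfl)
      have hA : compute_slice_distribution k p b0 none =
          compute_slice_distribution k p b0 (some (PySem.Int.mod (2 * pyPowMod 3 (-1) p) p)) := by
        simp only [compute_slice_distribution, hg, Option.getD_some]
      have hB : compute_slice_distribution_alt k p b0 none =
          compute_slice_distribution_alt k p b0 (some (PySem.Int.mod (2 * pyPowMod 3 (-1) p) p)) := by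
        simp only [compute_slice_distribution_alt]
      rw [hA, hB]
      exact core k p b0 _ hk (fun _ => hp1)
  · obtain ⟨hb0, hlt⟩ := emptySlice_sound k b0 (by omega) hch
    have hemp : (PySem.Int.bitLength ((3 : Int) ^ k.toNat) : Int) - k < b0 := by
      have ht : 1 ≤ 3 ^ k.toNat := Nat.one_le_pow _ _ (by omega)
      have hcast : ((3 : Int) ^ k.toNat) = ((3 ^ k.toNat : Nat) : Int) := by push_cast; ring
      rw [hcast, bitLength_eq_size _ ht]
      have hsz : Nat.size (3 ^ k.toNat) ≤ (k + b0 - 1).toNat := Nat.size_le.mpr hlt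
      omega
    rw [A_empty k p b0 g (by omega) hemp, B_empty k p b0 g (by omega) hemp]
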